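-- pv_equiv track=rewrite | github.com/SergeyB361/zero-to-qa | algorithms_course/week_07/day_01_heap_priority_queue/examples.py | process_with_priority
-- ===== SOURCE A (Python) =====
-- import heapq
--
-- def process_with_priority(tasks: list[tuple[int, str]]) -> list[str]:
--     heap = tasks[:]
--     heapq.heapify(heap)
--     result: list[str] = []
--     while heap:
--         _, task_name = heapq.heappop(heap)
--         result.append(task_name)
--     return result
-- ===== SOURCE B (Python) =====
-- def process_with_priority(tasks: list[tuple[int, str]]) -> list[str]:
--     return [name for _, name in sorted(tasks)]
-- ===== Notes on version B (the rewrite author's own statement) =====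
-- stated objective: idiomatic
-- what changed: Replaces the heapify-then-repeated-heappop loop with a single sorted() call and a comprehension projecting the names; tuple comparison gives the same ascending order and tie-break as repeated heappop.
import Mathlib
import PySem

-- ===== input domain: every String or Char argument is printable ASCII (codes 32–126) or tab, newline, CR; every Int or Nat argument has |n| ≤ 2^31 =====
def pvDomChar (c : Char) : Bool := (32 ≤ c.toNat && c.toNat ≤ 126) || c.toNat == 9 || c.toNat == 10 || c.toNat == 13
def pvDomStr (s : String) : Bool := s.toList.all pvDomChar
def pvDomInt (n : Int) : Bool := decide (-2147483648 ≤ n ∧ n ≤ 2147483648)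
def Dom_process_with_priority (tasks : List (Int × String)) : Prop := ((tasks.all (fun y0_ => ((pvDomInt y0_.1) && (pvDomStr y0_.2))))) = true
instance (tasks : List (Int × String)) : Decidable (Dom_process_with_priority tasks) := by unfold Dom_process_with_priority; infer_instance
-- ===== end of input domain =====

-- B replaces A's heapify + repeated-heappop loop by one sorted() call plus a name projection (idiomatic).
-- heapq is ported at its documented contract: heappop removes and returns the smallest element in
-- Python's tuple order (first components, then second); A's while-loop structure is preserved.

-- ===== PORT A =====
-- Python tuple '<' on (int, str): compare first components, tie-break on the second.
def tupLt (a b : Int × String) : Bool :=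
  decide (a.1 < b.1) || (!decide (b.1 < a.1) && decide (a.2 < b.2))

-- heappop: remove the smallest element (first occurrence) from the heap, return it with the rest.
def heapPop (m : Int × String) : List (Int × String) → (Int × String) × List (Int × String)
  | [] => (m, [])
  | x :: xs =>
    if tupLt x m then
      ((heapPop x xs).1, m :: (heapPop x xs).2)
    else
      ((heapPop m xs).1, x :: (heapPop m xs).2)

theorem heapPop_length (m : Int × String) (xs : List (Int × String)) :
    (heapPop m xs).2.length = xs.length := by
  induction xs generalizing m with
  | nil => simp [heapPop]
  | cons x xs ih => simp only [heapPop]; split <;> simp [ih]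

-- while heap: _, task_name = heappop(heap); result.append(task_name)
def popAll : List (Int × String) → List String
  | [] => []
  | x :: xs => (heapPop x xs).1.2 :: popAll (heapPop x xs).2
termination_by l => l.length
decreasing_by simp [heapPop_length]

def process_with_priority (tasks : List (Int × String)) : List String :=
  popAll tasks

-- ===== PORT B =====
def process_with_priority_alt (tasks : List (Int × String)) : List String :=
  (PySem.List.sorted2 tasks Prod.fst Prod.snd).map Prod.snd

-- ===== PRECONDITION & SPEC =====
def Spec_process_with_priority (tasks : List (Int × String)) (out : List String) : Prop := out = process_with_priority_alt tasks
instance (tasks : List (Int × String)) (out : List String) : Decidable (Spec_process_with_priority tasks out) := by unfold Spec_process_with_priority; infer_instance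

-- ===== CLAIM (what is proved, stated in full; the proofs are below) =====
def Claim_equal_process_with_priority : Prop := ∀ (tasks : List (Int × String)), Dom_process_with_priority tasks → Spec_process_with_priority tasks (process_with_priority tasks)

-- ===== LEMMAS AND PROOFS =====

-- Prop form of the strict tuple order, and the non-strict order used for Pairwise
def tupLtP (a b : Int × String) : Prop := a.1 < b.1 ∨ (a.1 = b.1 ∧ a.2 < b.2)

def tupLe (a b : Int × String) : Prop := tupLt b a = false

theorem tupLt_iff (a b : Int × String) : tupLt a b = true ↔ tupLtP a b := by
  simp only [tupLt, tupLtP, Bool.or_eq_true, Bool.and_eq_true, Bool.not_eq_eq_eq_not,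
    Bool.not_true, decide_eq_true_eq, decide_eq_false_iff_not]
  constructor
  · rintro (h | ⟨h1, h2⟩)
    · exact Or.inl h
    · by_cases hlt : a.1 < b.1
      · exact Or.inl hlt
      · exact Or.inr ⟨by omega, h2⟩
  · rintro (h | ⟨h1, h2⟩)
    · exact Or.inl h
    · exact Or.inr ⟨by omega, h2⟩

theorem tupLt_false_iff (a b : Int × String) : tupLt a b = false ↔ ¬ tupLtP a b := by
  rw [← tupLt_iff]; cases tupLt a b <;> simp

theorem tupLtP_trans {a b c : Int × String} (h1 : tupLtP a b) (h2 : tupLtP b c) : tupLtP a c := by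
  rcases h1 with h1 | ⟨h1a, h1b⟩ <;> rcases h2 with h2 | ⟨h2a, h2b⟩
  · exact Or.inl (by omega)
  · exact Or.inl (by omega)
  · exact Or.inl (by omega)
  · exact Or.inr ⟨by omega, lt_trans h1b h2b⟩

theorem tupLtP_irrefl (a : Int × String) : ¬ tupLtP a a := by
  rintro (h | ⟨_, h⟩)
  · omega
  · exact lt_irrefl _ h

theorem tupLtP_trichotomy (a b : Int × String) : tupLtP a b ∨ a = b ∨ tupLtP b a := by
  rcases lt_trichotomy a.1 b.1 with h | h | h
  · exact Or.inl (Or.inl h)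
  · rcases lt_trichotomy a.2 b.2 with h2 | h2 | h2
    · exact Or.inl (Or.inr ⟨h, h2⟩)
    · exact Or.inr (Or.inl (Prod.ext h h2))
    · exact Or.inr (Or.inr (Or.inr ⟨h.symm, h2⟩))
  · exact Or.inr (Or.inr (Or.inl h))

theorem tupLt_asymm {a b : Int × String} (h : tupLt a b = true) : tupLt b a = false := by
  rw [tupLt_iff] at h
  rw [tupLt_false_iff]
  exact fun h' => tupLtP_irrefl a (tupLtP_trans h h')

theorem tupLe_trans {a b c : Int × String} (h1 : tupLe a b) (h2 : tupLe b c) : tupLe a c := by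
  unfold tupLe at *
  rw [tupLt_false_iff] at h1 h2 ⊢
  intro h
  rcases tupLtP_trichotomy a b with hb | rfl | hb
  · exact h2 (tupLtP_trans h hb)
  · exact h2 h
  · exact h1 hb

theorem tupLe_antisymm {a b : Int × String} (h1 : tupLe a b) (h2 : tupLe b a) : a = b := by
  unfold tupLe at *
  rw [tupLt_false_iff] at h1 h2
  rcases tupLtP_trichotomy a b with h | h | h
  · exact absurd h h2
  · exact h
  · exact absurd h h1

-- heapPop returns a permutation: the popped element consed on the rest is m :: xs
theorem heapPop_perm (m : Int × String) (xs : List (Int × String)) :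
    ((heapPop m xs).1 :: (heapPop m xs).2).Perm (m :: xs) := by
  induction xs generalizing m with
  | nil => simp [heapPop]
  | cons x xs ih =>
    simp only [heapPop]
    split
    · dsimp only
      exact (List.Perm.swap m (heapPop x xs).1 (heapPop x xs).2).trans ((ih x).cons m)
    · dsimp only
      exact ((List.Perm.swap x (heapPop m xs).1 (heapPop m xs).2).trans ((ih m).cons x)).trans
        (List.Perm.swap m x xs)

-- the popped element is a lower bound of m :: xs
theorem heapPop_min (m : Int × String) (xs : List (Int × String)) :
    ∀ y ∈ m :: xs, tupLt y (heapPop m xs).1 = false := by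
  induction xs generalizing m with
  | nil =>
    intro y hy
    simp only [List.mem_cons, List.not_mem_nil, or_false] at hy
    subst hy
    simp only [heapPop]
    rw [tupLt_false_iff]
    exact tupLtP_irrefl y
  | cons x xs ih =>
    intro y hy
    simp only [heapPop]
    split
    · rename_i hlt
      dsimp only
      simp only [List.mem_cons] at hy
      rcases hy with rfl | rfl | hy
      · rw [tupLt_false_iff]
        intro h
        exact (tupLt_false_iff _ _).mp (ih x x (by simp))
          (tupLtP_trans ((tupLt_iff _ _).mp hlt) h)
      · exact ih y y (by simp)
      · exact ih x y (by simp [hy])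
    · rename_i hnlt
      dsimp only
      simp only [List.mem_cons] at hy
      rcases hy with rfl | rfl | hy
      · exact ih y y (by simp)
      · exact tupLe_trans (ih m m (by simp)) (eq_false_of_ne_true hnlt)
      · exact ih m y (by simp [hy])

-- proof-side mirror of popAll that keeps the pairs
def popPairs : List (Int × String) → List (Int × String)
  | [] => []
  | x :: xs => (heapPop x xs).1 :: popPairs (heapPop x xs).2
termination_by l => l.length
decreasing_by simp [heapPop_length]

theorem popAll_eq_map (xs : List (Int × String)) :
    popAll xs = (popPairs xs).map Prod.snd := by
  induction xs using popAll.induct with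
  | case1 => simp [popAll, popPairs]
  | case2 x xs ih => rw [popAll, popPairs]; simp [ih]

theorem popPairs_perm (xs : List (Int × String)) : (popPairs xs).Perm xs := by
  induction xs using popPairs.induct with
  | case1 => simp [popPairs]
  | case2 x xs ih =>
    rw [popPairs]
    exact (ih.cons (heapPop x xs).1).trans (heapPop_perm x xs)

theorem popPairs_pairwise (xs : List (Int × String)) : (popPairs xs).Pairwise tupLe := by
  induction xs using popPairs.induct with
  | case1 => simp [popPairs]
  | case2 x xs ih =>
    rw [popPairs]
    refine List.Pairwise.cons (fun y hy => ?_) ih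
    have hy2 : y ∈ (heapPop x xs).2 := (popPairs_perm _).mem_iff.mp hy
    have : y ∈ x :: xs := (heapPop_perm x xs).mem_iff.mp (List.mem_cons_of_mem _ hy2)
    exact heapPop_min x xs y this

theorem insertBy_mem_of (x z : Int × String) (ys : List (Int × String))
    (h : z ∈ PySem.List.insertBy tupLt x ys) : z = x ∨ z ∈ ys := by
  exact (PySem.List.mem_insertBy tupLt x z ys).mp h

theorem insertBy_pairwise (x : Int × String) (ys : List (Int × String))
    (h : ys.Pairwise tupLe) : (PySem.List.insertBy tupLt x ys).Pairwise tupLe := by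
  induction ys with
  | nil => simp [PySem.List.insertBy]
  | cons y ys ih =>
    rw [PySem.List.insertBy]
    rcases List.pairwise_cons.mp h with ⟨hy, hys⟩
    split
    · rename_i hlt
      refine List.Pairwise.cons (fun z hz => ?_) h
      rcases List.mem_cons.mp hz with rfl | hz
      · exact tupLt_asymm hlt
      · exact tupLe_trans (tupLt_asymm hlt) (hy z hz)
    · rename_i hnlt
      refine List.Pairwise.cons (fun z hz => ?_) (ih hys)
      rcases insertBy_mem_of x z ys hz with rfl | hz
      · exact eq_false_of_ne_true hnlt
      · exact hy z hz

theorem foldl_insertBy_pairwise (xs acc : List (Int × String)) (h : acc.Pairwise tupLe) :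
    (xs.foldl (fun acc x => PySem.List.insertBy tupLt x acc) acc).Pairwise tupLe := by
  induction xs generalizing acc with
  | nil => exact h
  | cons x xs ih => exact ih _ (insertBy_pairwise x acc h)

theorem sorted2_pairwise (xs : List (Int × String)) :
    (PySem.List.sorted2 xs Prod.fst Prod.snd).Pairwise tupLe := by
  exact foldl_insertBy_pairwise xs [] (by simp)

theorem popPairs_eq_sorted2 (xs : List (Int × String)) :
    popPairs xs = PySem.List.sorted2 xs Prod.fst Prod.snd := by
  refine List.Perm.eq_of_pairwise (le := tupLe) (fun a b _ _ h1 h2 => tupLe_antisymm h1 h2)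
    (popPairs_pairwise xs) (sorted2_pairwise xs)
    ((popPairs_perm xs).trans (PySem.List.sorted2_perm xs Prod.fst Prod.snd false).symm)

-- ===== VERDICT (by name: the statement is the Claim_ definition above) =====
theorem process_with_priority_spec : Claim_equal_process_with_priority := by
  intro tasks _
  unfold Spec_process_with_priority process_with_priority process_with_priority_alt
  rw [popAll_eq_map, popPairs_eq_sorted2]
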